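-- pv_equiv track=rewrite | github.com/genakoganovich/regex_engine | Regex Engine/task/regex/regex.py | match_equal_length
-- ===== SOURCE A (Python) =====
-- def compare(regex, input_string):
--     if not regex:
--         return True
--     if not input_string:
--         return False
--     if regex == '.':
--         return True
--     return regex == input_string
--
-- def match_equal_length(regex, input_string):
--     if not regex:
--         return True
--     if regex == '$' and not input_string:
--         return True
--     if not input_string:
--         return False
--     if not compare(regex[0], input_string[0]):
--         return False
--     return match_equal_length(regex[1:], input_string[1:])
-- ===== SOURCE B (Python) =====
-- def match_equal_length(regex, input_string):
--     n = len(regex)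
--     m = len(input_string)
--     for i in range(n):
--         if i + 1 == n and regex[i] == '$' and i == m:
--             return True
--         if i >= m:
--             return False
--         if regex[i] != '.' and regex[i] != input_string[i]:
--             return False
--     return True
-- ===== Notes on version B (the rewrite author's own statement) =====
-- stated objective: faster
-- what changed: Replaced the tail-slicing recursion (regex[1:] copies the tail each step) with a single index loop that inlines the compare helper as a char test, keeping only the index i.
import Mathlib
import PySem

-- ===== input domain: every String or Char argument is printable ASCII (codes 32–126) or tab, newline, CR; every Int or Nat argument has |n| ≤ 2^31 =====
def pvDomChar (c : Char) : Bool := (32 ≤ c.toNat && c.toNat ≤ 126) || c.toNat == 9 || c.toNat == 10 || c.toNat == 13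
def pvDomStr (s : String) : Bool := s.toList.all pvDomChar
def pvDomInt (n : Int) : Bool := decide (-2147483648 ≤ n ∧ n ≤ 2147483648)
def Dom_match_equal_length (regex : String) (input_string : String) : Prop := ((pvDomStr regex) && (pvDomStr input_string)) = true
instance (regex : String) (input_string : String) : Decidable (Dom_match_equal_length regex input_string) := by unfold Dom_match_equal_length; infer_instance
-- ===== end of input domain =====

-- B replaces A's tail-slicing recursion with a single index loop (compare inlined as a char test); return value only.


-- ===== PORT A =====
-- compare is only ever called with length-1 strings (regex[0], input_string[0]), so it is
-- ported on Char: the two emptiness branches of the Python can never fire and are dropped;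
-- on single characters 'regex == "."' is 'c = '.'' and string equality is char equality (exact).
def pyCompare (regex : Char) (input_string : Char) : Bool :=
  if regex = '.' then true else regex = input_string

def matchAux : List Char → List Char → Bool
  | [], _ => true
  | c :: rt, s =>
    if (c :: rt) = ['$'] ∧ s = [] then true
    else
      match s with
      | [] => false
      | d :: st => if !(pyCompare c d) then false else matchAux rt st

def match_equal_length (regex : String) (input_string : String) : Bool :=
  matchAux regex.toList input_string.toList

-- ===== PORT B =====
def loopB (r : List Char) (s : List Char) (i : Nat) : Bool :=
  if h : i < r.length then
    if i + 1 = r.length ∧ r[i] = '$' ∧ i = s.length then true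
    else if hs : i < s.length then
      if r[i] ≠ '.' ∧ r[i] ≠ s[i] then false else loopB r s (i + 1)
    else false
  else true
termination_by r.length - i

def match_equal_length_alt (regex : String) (input_string : String) : Bool :=
  loopB regex.toList input_string.toList 0

-- ===== PRECONDITION & SPEC =====
def Spec_match_equal_length (regex : String) (input_string : String) (out : Bool) : Prop := out = match_equal_length_alt regex input_string
instance (regex : String) (input_string : String) (out : Bool) : Decidable (Spec_match_equal_length regex input_string out) := by unfold Spec_match_equal_length; infer_instance

-- ===== CLAIM (what is proved, stated in full; the proofs are below) =====
def Claim_equal_match_equal_length : Prop := ∀ (regex : String) (input_string : String), Dom_match_equal_length regex input_string → Spec_match_equal_length regex input_string (match_equal_length regex input_string)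

-- ===== LEMMAS AND PROOFS =====
lemma loopB_eq_matchAux (r s : List Char) (i : Nat) (hi : i ≤ s.length) :
    loopB r s i = matchAux (r.drop i) (s.drop i) := by
  fun_induction loopB r s i with
  | case1 i h hdol =>
    -- terminator: regex[i:] = "$" and input exhausted
    obtain ⟨h1, h2, h3⟩ := hdol
    rw [List.drop_eq_getElem_cons h]
    have hrt : r.drop (i + 1) = [] := by simp [List.drop_eq_nil_iff]; omega
    have hst : s.drop i = [] := by simp [List.drop_eq_nil_iff]; omega
    simp [matchAux, hrt, hst, h2]
  | case2 i h hnot hs hmis =>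
    rw [List.drop_eq_getElem_cons h, List.drop_eq_getElem_cons hs]
    simp only [matchAux]
    rw [if_neg (fun hc => List.cons_ne_nil _ _ hc.2)]
    have hcmp : pyCompare r[i] s[i] = false := by
      simp [pyCompare, hmis.1, hmis.2]
    rw [hcmp]
    simp
  | case3 i h hnot hs hok ih =>
    rw [List.drop_eq_getElem_cons h, List.drop_eq_getElem_cons hs]
    simp only [matchAux]
    rw [if_neg (fun hc => List.cons_ne_nil _ _ hc.2)]
    have hcmp : pyCompare r[i] s[i] = true := by
      by_cases hd : r[i] = '.'
      · simp [pyCompare, hd]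
      · have : r[i] = s[i] := by
          rcases not_and_or.mp hok with h' | h'
          · exact absurd hd (by simpa using h')
          · simpa using h'
        simp [pyCompare, this]
    rw [hcmp]
    simpa using ih (by omega)
  | case4 i h hnot hs =>
    -- input exhausted (i = s.length, terminator check failed): both return false
    have hseq : i = s.length := by omega
    have hst : s.drop i = [] := by simp [List.drop_eq_nil_iff]; omega
    rw [List.drop_eq_getElem_cons h, hst]
    have hne : ¬(r[i] :: r.drop (i + 1) = ['$'] ∧ True) := by
      intro ⟨h1, _⟩
      have hc : r[i] = '$' := (List.cons_eq_cons.mp h1).1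
      have ht : r.drop (i + 1) = [] := (List.cons_eq_cons.mp h1).2
      have : i + 1 = r.length := by
        have := List.drop_eq_nil_iff.mp ht; omega
      exact hnot ⟨this, hc, hseq⟩
    simp only [matchAux]
    rw [if_neg hne]
  | case5 i h =>
    have hrt : r.drop i = [] := by simp [List.drop_eq_nil_iff]; omega
    simp [matchAux, hrt]

-- ===== VERDICT (by name: the statement is the Claim_ definition above) =====
theorem match_equal_length_spec : Claim_equal_match_equal_length := by
  intro regex input_string _
  unfold Spec_match_equal_length match_equal_length match_equal_length_alt
  rw [loopB_eq_matchAux _ _ 0 (Nat.zero_le _)]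
  simp
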